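-- pv_equiv track=rewrite | github.com/mwjin/lab-modules | lab/gene/utils.py | get_genic_region_val
-- ===== SOURCE A (Python) =====
-- GENIC_REGION_LIST = ['ORF', '5UTR', '3UTR', 'ncRNA_exonic', 'intronic', 'ncRNA_intronic', 'intergenic']
--
-- _region_to_bit_pos = {genic_region: (i + 1) for i, genic_region in enumerate(GENIC_REGION_LIST)}
--
-- def get_genic_region_val(genic_region_to_bool):
--     """
--     get the genic region value by parsing the input dictionary
--     :param genic_region_to_bool: a dictionary
--                                  (key: genic region,
--                                   value: a boolean value (whether the region is used for the annotation)
--     :return: an integer that represents a genic region value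
--     """
--     if genic_region_to_bool['intergenic']:
--         return 0
--     else:
--         region_val = 0
--
--         for genic_region in GENIC_REGION_LIST:
--             if genic_region_to_bool[genic_region]:
--                 bit_pos = _region_to_bit_pos[genic_region]
--                 region_val += 2 ** (6 - bit_pos)
--
--         assert region_val != 0
--         return region_val
-- ===== SOURCE B (Python) =====
-- GENIC_REGION_LIST = ['ORF', '5UTR', '3UTR', 'ncRNA_exonic', 'intronic', 'ncRNA_intronic', 'intergenic']
--
--
-- def get_genic_region_val(genic_region_to_bool):
--     if genic_region_to_bool['intergenic']:
--         return 0
--     bits = ''.join('1' if genic_region_to_bool[r] else '0' for r in GENIC_REGION_LIST[:6])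
--     region_val = int(bits, 2)
--     assert region_val != 0
--     return region_val
-- ===== Notes on version B (the rewrite author's own statement) =====
-- stated objective: idiomatic
-- what changed: B builds a 6-character MSB-first binary string from the region flags and decodes it with int(bits, 2), instead of A's per-region power-of-two arithmetic accumulation via a bit-position dict.
import Mathlib
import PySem

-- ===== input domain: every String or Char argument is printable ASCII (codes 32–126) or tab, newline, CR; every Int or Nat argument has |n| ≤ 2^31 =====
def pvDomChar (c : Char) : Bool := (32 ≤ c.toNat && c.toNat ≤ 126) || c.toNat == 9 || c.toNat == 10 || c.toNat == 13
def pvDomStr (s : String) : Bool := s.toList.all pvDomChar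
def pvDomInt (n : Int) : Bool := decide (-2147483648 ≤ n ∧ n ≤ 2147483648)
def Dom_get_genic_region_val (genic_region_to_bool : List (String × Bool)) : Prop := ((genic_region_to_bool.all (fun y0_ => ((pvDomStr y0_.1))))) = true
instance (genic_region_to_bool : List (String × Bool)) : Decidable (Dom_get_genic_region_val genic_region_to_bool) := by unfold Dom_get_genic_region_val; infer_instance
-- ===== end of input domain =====

-- B replaces A's power-of-two accumulation by building an MSB-first binary bit string and decoding it base 2 (idiomatic, same cost).


-- shared module constant GENIC_REGION_LIST
def pvRegionList : List String :=
  ["ORF", "5UTR", "3UTR", "ncRNA_exonic", "intronic", "ncRNA_intronic", "intergenic"]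

-- ===== PORT A =====
-- _region_to_bit_pos = {genic_region: (i + 1) for i, genic_region in enumerate(GENIC_REGION_LIST)}
def pvRegionToBitPos : PySem.Dict String Int :=
  (PySem.List.enumerate pvRegionList).foldl
    (fun d p => PySem.Dict.insert d p.2 (p.1 + 1)) PySem.Dict.empty

def get_genic_region_val (genic_region_to_bool : List (String × Bool)) : Int :=
  if (PySem.Dict.get? (PySem.Dict.mk genic_region_to_bool) "intergenic").getD false then 0
  else
    pvRegionList.foldl
      (fun region_val genic_region =>
        if (PySem.Dict.get? (PySem.Dict.mk genic_region_to_bool) genic_region).getD false then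
          let bit_pos := (PySem.Dict.get? pvRegionToBitPos genic_region).getD 0
          region_val + 2 ^ ((6 - bit_pos).toNat)
        else region_val) 0

-- ===== PORT B =====
-- int(bits, 2) for a string of '0'/'1' chars: exact hand port of base-2 decoding on that domain
def pvDecodeBin (bits : List Char) : Int :=
  bits.foldl (fun acc c => acc * 2 + (if c = '1' then 1 else 0)) 0

def get_genic_region_val_alt (genic_region_to_bool : List (String × Bool)) : Int :=
  if (PySem.Dict.get? (PySem.Dict.mk genic_region_to_bool) "intergenic").getD false then 0
  else
    let bits := (pvRegionList.take 6).map
      (fun r => if (PySem.Dict.get? (PySem.Dict.mk genic_region_to_bool) r).getD false then '1' else '0')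
    pvDecodeBin bits

-- ===== PRECONDITION & SPEC =====
-- Pre_ excludes exactly the inputs where A raises: a missing 'intergenic' key (KeyError), a missing
-- region key when 'intergenic' is false (KeyError), and the all-false case (AssertionError).
def Pre_get_genic_region_val (genic_region_to_bool : List (String × Bool)) : Prop :=
  PySem.Dict.get? (PySem.Dict.mk genic_region_to_bool) "intergenic" = some true ∨
  (PySem.Dict.get? (PySem.Dict.mk genic_region_to_bool) "intergenic" = some false ∧
   (∀ r ∈ pvRegionList, (PySem.Dict.get? (PySem.Dict.mk genic_region_to_bool) r).isSome) ∧
   (∃ r ∈ pvRegionList.take 6, PySem.Dict.get? (PySem.Dict.mk genic_region_to_bool) r = some true))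
instance (genic_region_to_bool : List (String × Bool)) : Decidable (Pre_get_genic_region_val genic_region_to_bool) := by
  unfold Pre_get_genic_region_val; infer_instance

def pvWitness_get_genic_region_val : (List (String × Bool)) :=
  [("ORF", true), ("5UTR", false), ("3UTR", false), ("ncRNA_exonic", false),
   ("intronic", false), ("ncRNA_intronic", false), ("intergenic", false)]

def Spec_get_genic_region_val (genic_region_to_bool : List (String × Bool)) (out : Int) : Prop := out = get_genic_region_val_alt genic_region_to_bool
instance (genic_region_to_bool : List (String × Bool)) (out : Int) : Decidable (Spec_get_genic_region_val genic_region_to_bool out) := by unfold Spec_get_genic_region_val; infer_instance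

-- ===== CLAIM (what is proved, stated in full; the proofs are below) =====
def Claim_equal_get_genic_region_val : Prop := ∀ (genic_region_to_bool : List (String × Bool)), Dom_get_genic_region_val genic_region_to_bool → Pre_get_genic_region_val genic_region_to_bool → Spec_get_genic_region_val genic_region_to_bool (get_genic_region_val genic_region_to_bool)

-- ===== LEMMAS AND PROOFS =====

-- ===== VERDICT (by name: the statement is the Claim_ definition above) =====
theorem get_genic_region_val_spec : Claim_equal_get_genic_region_val := by
  intro d _ hpre
  unfold Spec_get_genic_region_val get_genic_region_val get_genic_region_val_alt
  rcases hpre with h | ⟨h, _, _⟩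
  · simp [h]
  · simp only [h, pvRegionList, pvDecodeBin, List.foldl_cons, List.foldl_nil,
      List.take, List.map, Option.getD_some, Bool.false_eq_true, if_false]
    generalize (PySem.Dict.get? (PySem.Dict.mk d) "ORF").getD false = b1
    generalize (PySem.Dict.get? (PySem.Dict.mk d) "5UTR").getD false = b2
    generalize (PySem.Dict.get? (PySem.Dict.mk d) "3UTR").getD false = b3
    generalize (PySem.Dict.get? (PySem.Dict.mk d) "ncRNA_exonic").getD false = b4
    generalize (PySem.Dict.get? (PySem.Dict.mk d) "intronic").getD false = b5
    generalize (PySem.Dict.get? (PySem.Dict.mk d) "ncRNA_intronic").getD false = b6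
    revert b1 b2 b3 b4 b5 b6
    decide
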